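-- pv_equiv track=rewrite | github.com/Blake1412/AdventOfCode | AOC_2023/Python/Day01/day01.py | get_numeric_from_string
-- ===== SOURCE A (Python) =====
-- numbers = {"one": "1", "two": "2", "three": "3", "four": "4", "five": "5", "six": "6", "seven": "7", "eight": "8", "nine": "9"}
--
-- def get_numeric_from_string(string: str, last=False):
--     if last:
--         for i in range(len(string), 0, -1):
--             for j in range(i - 1, -1, -1):
--                 substring = string[j:i]
--                 if substring in numbers:
--                     return numbers[substring]
--     else:
--         for i in range(len(string)):
--             for j in range(i + 1, len(string) + 1):
--                 substring = string[i:j]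
--                 if substring in numbers:
--                     return numbers[substring]
--     return None
-- ===== SOURCE B (Python) =====
-- numbers = {"one": "1", "two": "2", "three": "3", "four": "4", "five": "5", "six": "6", "seven": "7", "eight": "8", "nine": "9"}
--
-- def get_numeric_from_string(string: str, last=False):
--     # every key has length 3-5, so only three substrings need checking per position
--     n = len(string)
--     if last:
--         for e in range(n, 0, -1):
--             for length in (3, 4, 5):
--                 value = numbers.get(string[max(0, e - length):e])
--                 if value is not None:
--                     return value
--     else:
--         for i in range(n):
--             for length in (3, 4, 5):
--                 value = numbers.get(string[i:i + length])
--                 if value is not None: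
--                     return value
--     return None
-- ===== Notes on version B (the rewrite author's own statement) =====
-- stated objective: faster
-- what changed: A scans every substring starting (or ending) at each position against the word dict; B probes only the three substrings of length 3, 4 and 5 at each position, since every dict key has length 3-5, removing the inner position scan.
import Mathlib
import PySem

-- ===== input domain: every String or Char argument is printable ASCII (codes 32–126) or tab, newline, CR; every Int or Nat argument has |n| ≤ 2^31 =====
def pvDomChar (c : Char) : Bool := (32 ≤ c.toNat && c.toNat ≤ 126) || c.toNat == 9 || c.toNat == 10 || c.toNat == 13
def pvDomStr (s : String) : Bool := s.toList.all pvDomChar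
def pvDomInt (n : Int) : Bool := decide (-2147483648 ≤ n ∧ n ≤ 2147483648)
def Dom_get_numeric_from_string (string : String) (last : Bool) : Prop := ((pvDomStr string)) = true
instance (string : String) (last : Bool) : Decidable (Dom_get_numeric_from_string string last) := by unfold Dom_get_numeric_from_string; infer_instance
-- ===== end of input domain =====

-- B replaces A's inner scan over all end positions by three fixed-length dict probes per
-- position (every key has length 3-5), turning the cubic scan into a linear one.


-- the module-level dict `numbers`
def numbersD : PySem.Dict String String := PySem.Dict.mk
  [("one", "1"), ("two", "2"), ("three", "3"), ("four", "4"), ("five", "5"),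
   ("six", "6"), ("seven", "7"), ("eight", "8"), ("nine", "9")]

-- ===== PORT A =====
def get_numeric_from_string (string : String) (last : Bool) : Option String :=
  if last then
    (PySem.List.pyRange (PySem.Str.len string) 0 (-1)).findSome? (fun i =>
      (PySem.List.pyRange (i - 1) (-1) (-1)).findSome? (fun j =>
        numbersD.get? (PySem.Str.slice string (some j) (some i))))
  else
    (PySem.List.pyRange 0 (PySem.Str.len string) 1).findSome? (fun i =>
      (PySem.List.pyRange (i + 1) (PySem.Str.len string + 1) 1).findSome? (fun j =>
        numbersD.get? (PySem.Str.slice string (some i) (some j))))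

-- ===== PORT B =====
def get_numeric_from_string_alt (string : String) (last : Bool) : Option String :=
  let n := PySem.Str.len string
  if last then
    (PySem.List.pyRange n 0 (-1)).findSome? (fun e =>
      ([3, 4, 5] : List Int).findSome? (fun length =>
        numbersD.get? (PySem.Str.slice string (some (max 0 (e - length))) (some e))))
  else
    (PySem.List.pyRange 0 n 1).findSome? (fun i =>
      ([3, 4, 5] : List Int).findSome? (fun length =>
        numbersD.get? (PySem.Str.slice string (some i) (some (i + length)))))

-- ===== PRECONDITION & SPEC =====
def Spec_get_numeric_from_string (string : String) (last : Bool) (out : Option String) : Prop := out = get_numeric_from_string_alt string last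
instance (string : String) (last : Bool) (out : Option String) : Decidable (Spec_get_numeric_from_string string last out) := by unfold Spec_get_numeric_from_string; infer_instance

-- ===== CLAIM (what is proved, stated in full; the proofs are below) =====
def Claim_equal_get_numeric_from_string : Prop := ∀ (string : String) (last : Bool), Dom_get_numeric_from_string string last → Spec_get_numeric_from_string string last (get_numeric_from_string string last)

-- ===== LEMMAS AND PROOFS =====

lemma beq_false_of_len {k u : String} (h : k.toList.length ≠ u.toList.length) : (k == u) = false := by
  rw [beq_eq_false_iff_ne]; rintro rfl; exact h rfl

-- every key of `numbers` has length 3, 4 or 5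
lemma lk_none (u : String) (h3 : u.toList.length ≠ 3) (h4 : u.toList.length ≠ 4)
    (h5 : u.toList.length ≠ 5) : numbersD.get? u = none := by
  unfold numbersD
  rw [PySem.Dict.get?_mk_cons, beq_false_of_len (by simpa using Ne.symm h3)]
  rw [PySem.Dict.get?_mk_cons, beq_false_of_len (by simpa using Ne.symm h3)]
  rw [PySem.Dict.get?_mk_cons, beq_false_of_len (by simpa using Ne.symm h5)]
  rw [PySem.Dict.get?_mk_cons, beq_false_of_len (by simpa using Ne.symm h4)]
  rw [PySem.Dict.get?_mk_cons, beq_false_of_len (by simpa using Ne.symm h4)]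
  rw [PySem.Dict.get?_mk_cons, beq_false_of_len (by simpa using Ne.symm h3)]
  rw [PySem.Dict.get?_mk_cons, beq_false_of_len (by simpa using Ne.symm h5)]
  rw [PySem.Dict.get?_mk_cons, beq_false_of_len (by simpa using Ne.symm h5)]
  rw [PySem.Dict.get?_mk_cons, beq_false_of_len (by simpa using Ne.symm h4)]
  rfl

lemma findSome?_cons_or {α β : Type} (f : α → Option β) (a : α) (l : List α) :
    List.findSome? f (a :: l) = (f a).or (List.findSome? f l) := by
  cases h : f a <;> simp [h, Option.or]

lemma findSome?_congr {α β : Type} {f g : α → Option β} (l : List α)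
    (h : ∀ x ∈ l, f x = g x) : List.findSome? f l = List.findSome? g l := by
  induction l with
  | nil => rfl
  | cons a t ih =>
    rw [findSome?_cons_or, findSome?_cons_or, h a (by simp),
        ih (fun x hx => h x (by simp [hx]))]

-- scanning substrings of lengths 1..m (shortest first) through the dict equals probing
-- just lengths 3, 4, 5 (clamped at m), because every key has length 3-5
lemma scan_core (m : Nat) (u : Nat → String)
    (h1 : ∀ L, 1 ≤ L → (u L).toList.length = min L m)
    (h2 : ∀ L, m ≤ L → u L = u m) :
    (List.range m).findSome? (fun k => numbersD.get? (u (k + 1)))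
      = (numbersD.get? (u 3)).or ((numbersD.get? (u 4)).or (numbersD.get? (u 5))) := by
  have k1 : ∀ L, 1 ≤ L → min L m ≠ 3 → min L m ≠ 4 → min L m ≠ 5 → numbersD.get? (u L) = none := by
    intro L hL a b c
    exact lk_none _ (by rw [h1 L hL]; exact a) (by rw [h1 L hL]; exact b) (by rw [h1 L hL]; exact c)
  rcases lt_or_ge m 6 with hm | hm
  · interval_cases m
    · simp [k1 3 (by omega) (by omega) (by omega) (by omega),
            k1 4 (by omega) (by omega) (by omega) (by omega),
            k1 5 (by omega) (by omega) (by omega) (by omega)]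
    · simp [List.range_succ,
            k1 1 (by omega) (by omega) (by omega) (by omega),
            k1 3 (by omega) (by omega) (by omega) (by omega),
            k1 4 (by omega) (by omega) (by omega) (by omega),
            k1 5 (by omega) (by omega) (by omega) (by omega)]
    · simp [List.range_succ,
            k1 1 (by omega) (by omega) (by omega) (by omega),
            k1 2 (by omega) (by omega) (by omega) (by omega),
            k1 3 (by omega) (by omega) (by omega) (by omega),
            k1 4 (by omega) (by omega) (by omega) (by omega),
            k1 5 (by omega) (by omega) (by omega) (by omega)]
    · rw [h2 4 (by omega), h2 5 (by omega)]
      simp [List.range_succ, findSome?_cons_or,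
            k1 1 (by omega) (by omega) (by omega) (by omega),
            k1 2 (by omega) (by omega) (by omega) (by omega)]
    · rw [h2 5 (by omega)]
      simp [List.range_succ, findSome?_cons_or,
            k1 1 (by omega) (by omega) (by omega) (by omega),
            k1 2 (by omega) (by omega) (by omega) (by omega)]
    · simp [List.range_succ, findSome?_cons_or,
            k1 1 (by omega) (by omega) (by omega) (by omega),
            k1 2 (by omega) (by omega) (by omega) (by omega)]
  · have hsplit : List.range m = List.range 5 ++ List.range' 5 (m - 5) := by
      rw [List.range_eq_range', show m = 5 + (m - 5) by omega, ← List.range'_append_1]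
      simp [List.range_eq_range']
    rw [hsplit, List.findSome?_append]
    have htail : (List.range' 5 (m - 5)).findSome? (fun k => numbersD.get? (u (k + 1))) = none := by
      rw [List.findSome?_eq_none_iff]
      intro x hx
      have : 5 ≤ x := by simp [List.mem_range'] at hx; omega
      exact k1 (x + 1) (by omega) (by omega) (by omega) (by omega)
    rw [htail]
    simp [List.range_succ, findSome?_cons_or,
          k1 1 (by omega) (by omega) (by omega) (by omega),
          k1 2 (by omega) (by omega) (by omega) (by omega)]

-- A's inner forward scan at start position i equals B's three probes
lemma inner_first (s : String) (i : Int) (h0 : 0 ≤ i) (hn : i < (s.toList.length : Int)) :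
    (PySem.List.pyRange (i + 1) ((s.toList.length : Int) + 1) 1).findSome?
        (fun j => numbersD.get? (PySem.Str.slice s (some i) (some j)))
      = ([3, 4, 5] : List Int).findSome?
        (fun length => numbersD.get? (PySem.Str.slice s (some i) (some (i + length)))) := by
  set u : Nat → String := fun L => PySem.Str.slice s (some i) (some (i + (L : Int))) with hu
  set m : Nat := s.toList.length - i.toNat with hmdef
  have h1 : ∀ L, 1 ≤ L → (u L).toList.length = min L m := by
    intro L hL
    simp only [hu, PySem.Str.slice, PySem.Chars.slice, String.toList_ofList]
    rw [PySem.List.slice_toNat _ (by omega) (by omega)]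
    simp only [List.length_take, List.length_drop]
    omega
  have h2 : ∀ L, m ≤ L → u L = u m := by
    intro L hLm
    simp only [hu, PySem.Str.slice, PySem.Chars.slice]
    congr 1
    rw [PySem.List.slice_toNat _ (by omega) (by omega),
        PySem.List.slice_toNat _ (by omega) (by omega),
        List.take_of_length_le (by simp only [List.length_drop]; omega),
        List.take_of_length_le (by simp only [List.length_drop]; omega)]
  have hml : ((s.toList.length : Int) + 1 - (i + 1)).toNat = m := by omega
  rw [PySem.List.pyRange_one, List.findSome?_map, hml]
  have hstep : (List.range m).findSome? ((fun j => numbersD.get? (PySem.Str.slice s (some i) (some j))) ∘ (fun k : Nat => i + 1 + (k : Int)))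
      = (List.range m).findSome? (fun k => numbersD.get? (u (k + 1))) := by
    apply findSome?_congr
    intro k _
    simp only [Function.comp, hu]
    congr 3
    push_cast
    ring
  rw [hstep, scan_core m u h1 h2]
  rw [findSome?_cons_or, findSome?_cons_or, findSome?_cons_or]
  simp only [List.findSome?_nil, Option.or_none, hu]
  norm_num

-- A's inner backward scan at end position e equals B's three probes
lemma inner_last (s : String) (e : Int) (h0 : 0 < e) (hn : e ≤ (s.toList.length : Int)) :
    (PySem.List.pyRange (e - 1) (-1) (-1)).findSome?
        (fun j => numbersD.get? (PySem.Str.slice s (some j) (some e)))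
      = ([3, 4, 5] : List Int).findSome?
        (fun length => numbersD.get? (PySem.Str.slice s (some (max 0 (e - length))) (some e))) := by
  set u : Nat → String := fun L => PySem.Str.slice s (some (max 0 (e - (L : Int)))) (some e) with hu
  set m : Nat := e.toNat with hmdef
  have hmax : ∀ L : Nat, ((max 0 (e - (L : Int)))).toNat = e.toNat - L := by
    intro L
    rcases le_total (e - (L : Int)) 0 with h | h
    · rw [max_eq_left h]; omega
    · rw [max_eq_right h]; omega
  have h1 : ∀ L, 1 ≤ L → (u L).toList.length = min L m := by
    intro L hL
    simp only [hu, PySem.Str.slice, PySem.Chars.slice, String.toList_ofList]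
    rw [PySem.List.slice_toNat _ (by positivity) (by omega)]
    simp only [List.length_take, List.length_drop]
    rw [hmax]
    omega
  have h2 : ∀ L, m ≤ L → u L = u m := by
    intro L hLm
    simp only [hu]
    congr 2
    have a1 : e - (L : Int) ≤ 0 := by omega
    have a2 : e - (m : Int) ≤ 0 := by omega
    rw [max_eq_left a1, max_eq_left a2]
  have hml : (e - 1 - (-1)).toNat = m := by omega
  rw [PySem.List.pyRange_neg_one, hml, List.findSome?_map]
  have hstep : (List.range m).findSome? ((fun j => numbersD.get? (PySem.Str.slice s (some j) (some e))) ∘ (fun k : Nat => e - 1 - (k : Int)))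
      = (List.range m).findSome? (fun k => numbersD.get? (u (k + 1))) := by
    apply findSome?_congr
    intro k hk
    have hkm : k < m := List.mem_range.mp hk
    simp only [Function.comp, hu]
    congr 3
    have : (0 : Int) ≤ e - ((k + 1 : Nat) : Int) := by omega
    rw [max_eq_right this]
    push_cast
    ring
  rw [hstep, scan_core m u h1 h2]
  rw [findSome?_cons_or, findSome?_cons_or, findSome?_cons_or]
  simp only [List.findSome?_nil, Option.or_none, hu]
  norm_num

-- ===== VERDICT (by name: the statement is the Claim_ definition above) =====
theorem get_numeric_from_string_spec : Claim_equal_get_numeric_from_string := by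
  intro string last _
  unfold Spec_get_numeric_from_string get_numeric_from_string get_numeric_from_string_alt
  cases last
  · simp only [Bool.false_eq_true, if_false, PySem.Str.len_eq]
    apply findSome?_congr
    intro i hi
    rw [PySem.List.mem_pyRange_one] at hi
    exact inner_first string i hi.1 hi.2
  · simp only [if_true, PySem.Str.len_eq]
    apply findSome?_congr
    intro e he
    rw [PySem.List.mem_pyRange_neg_one] at he
    exact inner_last string e he.1 he.2
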